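-- pv_equiv track=rewrite | github.com/Panbear1983/Multi-Funtion_SOC_Agent_Research | openAI_Agentic_SOC_Analyst/archive/CTF_HUNT_MODE_OLD_BACKUP.py | extract_answer_from_text
-- ===== SOURCE A (Python) =====
-- def extract_answer_from_text(text):
--     """Extract answer from LLM analysis text"""
--     lines = text.split('\n')
--     for line in lines:
--         if line.strip().upper().startswith('ANSWER:'):
--             return line.split(':', 1)[1].strip()
--     # If no explicit ANSWER: line, return first non-empty line
--     for line in lines:
--         if line.strip():
--             return line.strip()
--     return text.strip()
-- ===== SOURCE B (Python) =====
-- def extract_answer_from_text(text):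
--     """Extract answer from LLM analysis text (single pass)"""
--     first = None
--     for line in text.split('\n'):
--         s = line.strip()
--         if s.upper().startswith('ANSWER:'):
--             return line.split(':', 1)[1].strip()
--         if first is None and s:
--             first = s
--     return first if first is not None else text.strip()
-- ===== Notes on version B (the rewrite author's own statement) =====
-- stated objective: alternative
-- what changed: The two sequential scans over the split lines (one searching for an ANSWER: line, a second for the first non-empty line) are fused into a single pass that short-circuits on ANSWER: and records the first non-empty stripped line in an assigned-once slot, falling back to text.strip().
import Mathlib
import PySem

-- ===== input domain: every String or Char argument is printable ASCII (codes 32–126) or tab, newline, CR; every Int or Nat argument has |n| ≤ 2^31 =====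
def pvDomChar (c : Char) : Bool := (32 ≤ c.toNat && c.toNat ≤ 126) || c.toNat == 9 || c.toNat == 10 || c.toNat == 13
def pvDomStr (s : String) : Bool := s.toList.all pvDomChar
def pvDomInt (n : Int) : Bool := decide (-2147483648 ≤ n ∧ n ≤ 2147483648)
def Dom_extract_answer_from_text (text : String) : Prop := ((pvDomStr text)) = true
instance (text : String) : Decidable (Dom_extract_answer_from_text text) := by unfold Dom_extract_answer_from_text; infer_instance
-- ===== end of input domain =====

-- B fuses A's two scans over the lines into one short-circuiting pass; same behaviour, alternative decomposition.

-- ===== PORT A =====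
-- first loop: return the answer part of the first line whose stripped, uppercased form starts with 'ANSWER:'
-- (line.split(':',1)[1] is total here because the guard guarantees a ':' in the line; getD "" is an unreachable totalisation)
def pvAAnswerLoop : List String → Option String
  | [] => none
  | l :: ls =>
    if PySem.Str.startswith (PySem.Str.upper (PySem.Str.strip l)) "ANSWER:" then
      some (PySem.Str.strip ((PySem.List.pyGet? ((PySem.Str.splitMax? l ":" 1).getD [l]) 1).getD ""))
    else pvAAnswerLoop ls

-- second loop: first line whose strip is non-empty
def pvAFirstLoop : List String → Option String
  | [] => none
  | l :: ls => if PySem.Str.strip l ≠ "" then some (PySem.Str.strip l) else pvAFirstLoop ls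

def extract_answer_from_text (text : String) : String :=
  let lines := (PySem.Str.split? text "\n").getD [text]
  match pvAAnswerLoop lines with
  | some r => r
  | none =>
    match pvAFirstLoop lines with
    | some r => r
    | none => PySem.Str.strip text

-- ===== PORT B =====
-- single pass: `first` is the assigned-once slot for the first non-empty stripped line;
-- an ANSWER: line returns immediately (modelled by the Option result from the loop)
def pvBLoop : List String → Option String → Option String
  | [], first => first
  | l :: ls, first =>
    let s := PySem.Str.strip l
    if PySem.Str.startswith (PySem.Str.upper s) "ANSWER:" then
      some (PySem.Str.strip ((PySem.List.pyGet? ((PySem.Str.splitMax? l ":" 1).getD [l]) 1).getD ""))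
    else pvBLoop ls (if first.isNone && !(s == "") then some s else first)

def extract_answer_from_text_alt (text : String) : String :=
  (pvBLoop ((PySem.Str.split? text "\n").getD [text]) none).getD (PySem.Str.strip text)

-- ===== PRECONDITION & SPEC =====
def Spec_extract_answer_from_text (text : String) (out : String) : Prop := out = extract_answer_from_text_alt text
instance (text : String) (out : String) : Decidable (Spec_extract_answer_from_text text out) := by unfold Spec_extract_answer_from_text; infer_instance

-- ===== CLAIM (what is proved, stated in full; the proofs are below) =====
def Claim_equal_extract_answer_from_text : Prop := ∀ (text : String), Dom_extract_answer_from_text text → Spec_extract_answer_from_text text (extract_answer_from_text text)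

-- ===== LEMMAS AND PROOFS =====

-- the fused loop equals: answer-scan result, else accumulator, else first-non-empty-scan result
theorem pvBLoop_eq (lines : List String) :
    ∀ first : Option String,
      pvBLoop lines first = (pvAAnswerLoop lines).or (first.or (pvAFirstLoop lines)) := by
  induction lines with
  | nil => intro first; cases first <;> simp [pvBLoop, pvAAnswerLoop, pvAFirstLoop]
  | cons l ls ih =>
    intro first
    simp only [pvBLoop, pvAAnswerLoop, pvAFirstLoop]
    by_cases hA : PySem.Str.startswith (PySem.Str.upper (PySem.Str.strip l)) "ANSWER:" = true
    · rw [if_pos hA, if_pos hA]; simp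
    · rw [if_neg hA, if_neg hA, ih]
      cases first with
      | some f => simp
      | none =>
        by_cases hs : PySem.Str.strip l = ""
        · simp [hs]
        · simp [hs]

-- ===== VERDICT (by name: the statement is the Claim_ definition above) =====
theorem extract_answer_from_text_spec : Claim_equal_extract_answer_from_text := by
  intro text _
  unfold Spec_extract_answer_from_text extract_answer_from_text extract_answer_from_text_alt
  rw [pvBLoop_eq]
  cases hA : pvAAnswerLoop ((PySem.Str.split? text "\n").getD [text]) with
  | some r => simp [hA]
  | none =>
    cases hF : pvAFirstLoop ((PySem.Str.split? text "\n").getD [text]) with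
    | some r => simp [hA, hF]
    | none => simp [hA, hF]
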